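-- pv_equiv track=rewrite | github.com/ManojKumarPatnaik/practice-alg | Solution/SameDigitMerge.py | solution
-- ===== SOURCE A (Python) =====
-- def solution(numbers):
--   """
--   Counts the number of pairs of numbers in the given array with the same first and last digits.
--
--   Args:
--     numbers: A list of integers, each with at least two digits and different first and last digits.
--
--   Returns:
--     The number of pairs of numbers in the given array with the same first and last digits.
--   """
--
--   # Create a dictionary where the keys are the first and last digits of the numbers,
--   # and the values are the counts of the numbers with those digits.
--   digitCounts = {}
--   for number in numbers:
--     firstDigit = int(str(number)[0])
--     lastDigit = int(str(number)[-1])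
--     digitCounts[(firstDigit, lastDigit)] = digitCounts.get((firstDigit, lastDigit), 0) + 1
--
--   # Calculate the number of pairs.
--   pairs = 0
--   for (firstDigit, _), firstCount in digitCounts.items():
--     for (_, lastDigit), lastCount in digitCounts.items():
--       if firstDigit == lastDigit:
--         pairs += firstCount * lastCount
--
--   return pairs
-- ===== SOURCE B (Python) =====
-- def solution(numbers):
--   # Two independent one-digit tallies instead of a double loop over key pairs:
--   # count numbers by first digit and by last digit, then sum the products.
--   firstCount = {}
--   lastCount = {}
--   for n in numbers:
--     s = str(n)
--     f = int(s[0])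
--     l = int(s[-1])
--     firstCount[f] = firstCount.get(f, 0) + 1
--     lastCount[l] = lastCount.get(l, 0) + 1
--   return sum(c * lastCount.get(d, 0) for d, c in firstCount.items())
-- ===== Notes on version B (the rewrite author's own statement) =====
-- stated objective: simpler
-- what changed: Replaces A's (first,last)-pair counter followed by a quadratic double loop over all key pairs with two independent single-digit tallies (first-digit counts and last-digit counts) and one multiply-sum over at most 10 digits.
import Mathlib
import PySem

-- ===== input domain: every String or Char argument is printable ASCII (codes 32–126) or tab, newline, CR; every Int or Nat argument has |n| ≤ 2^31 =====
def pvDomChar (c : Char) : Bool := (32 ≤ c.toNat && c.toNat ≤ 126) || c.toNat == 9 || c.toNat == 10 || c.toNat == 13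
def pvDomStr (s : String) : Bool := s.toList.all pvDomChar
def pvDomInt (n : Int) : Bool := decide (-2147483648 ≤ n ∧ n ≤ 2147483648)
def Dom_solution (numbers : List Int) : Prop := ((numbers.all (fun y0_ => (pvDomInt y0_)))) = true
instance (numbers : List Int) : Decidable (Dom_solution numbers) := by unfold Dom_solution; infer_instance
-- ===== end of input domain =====

-- One honest line: B replaces A's double loop over (first,last) key pairs with two
-- one-digit tallies and a single multiply-sum; equal because the double sum factors per digit.

-- ===== PORT A =====
-- int(str(n)[i]) — shared digit-extraction expression both Pythons contain verbatim;
-- .getD 0 is only reached where Python raises (excluded by Pre_solution).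
def pyDigitAt (n : Int) (i : Int) : Int :=
  ((PySem.List.pyGet? (PySem.Int.toChars n) i).bind (fun c => PySem.Int.ofChars? [c])).getD 0

def solution (numbers : List Int) : Int :=
  let digitCounts : PySem.Dict (Int × Int) Int :=
    numbers.foldl (fun d number =>
      d.insert (pyDigitAt number 0, pyDigitAt number (-1))
        (d.getD (pyDigitAt number 0, pyDigitAt number (-1)) 0 + 1)) PySem.Dict.empty
  digitCounts.items.foldl (fun pairs p1 =>
    digitCounts.items.foldl (fun pairs p2 =>
      if p1.1.1 = p2.1.2 then pairs + p1.2 * p2.2 else pairs) pairs) 0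

-- ===== PORT B =====
def solution_alt (numbers : List Int) : Int :=
  let counts := numbers.foldl
    (fun (st : PySem.Dict Int Int × PySem.Dict Int Int) n =>
      (st.1.insert (pyDigitAt n 0) (st.1.getD (pyDigitAt n 0) 0 + 1),
       st.2.insert (pyDigitAt n (-1)) (st.2.getD (pyDigitAt n (-1)) 0 + 1)))
    (PySem.Dict.empty, PySem.Dict.empty)
  (counts.1.items.map (fun p => p.2 * counts.2.getD p.1 0)).sum

-- ===== PRECONDITION & SPEC =====
-- Pre_ excludes negative numbers: there str(n)[0] is '-', so int('-') raises ValueError in A (and in B).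
def Pre_solution (numbers : List Int) : Prop := (numbers.all (fun n => decide (0 ≤ n))) = true
instance (numbers : List Int) : Decidable (Pre_solution numbers) := by unfold Pre_solution; infer_instance
def pvWitness_solution : List Int := [12, 34, 21, 47]

def Spec_solution (numbers : List Int) (out : Int) : Prop := out = solution_alt numbers
instance (numbers : List Int) (out : Int) : Decidable (Spec_solution numbers out) := by unfold Spec_solution; infer_instance

-- ===== CLAIM (what is proved, stated in full; the proofs are below) =====
def Claim_equal_solution : Prop := ∀ (numbers : List Int), Dom_solution numbers → Pre_solution numbers → Spec_solution numbers (solution numbers)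

-- ===== LEMMAS AND PROOFS =====

-- sum over a Nodup list of g·(indicator of equality to x) collapses to g x
theorem sum_map_delta {α : Type} [DecidableEq α] (g : α → Int) :
    ∀ (S : List α), S.Nodup → ∀ x ∈ S,
      (S.map (fun k => g k * (if x = k then (1 : Int) else 0))).sum = g x := by
  intro S
  induction S with
  | nil => intro _ x hx; cases hx
  | cons s t ih =>
    intro hnd x hx
    rcases List.nodup_cons.mp hnd with ⟨hs, hnt⟩
    simp only [List.map_cons, List.sum_cons]
    rcases List.mem_cons.mp hx with h | h
    · subst h
      have hz : (t.map (fun k => g k * (if x = k then (1 : Int) else 0))).sum = 0 := by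
        apply List.sum_eq_zero
        intro y hy
        rcases List.mem_map.mp hy with ⟨k, hk, rfl⟩
        have : x ≠ k := fun he => hs (he ▸ hk)
        simp [this]
      simp only [hz, add_zero, if_pos trivial]
      ring
    · have hxs : x ≠ s := fun he => hs (he ▸ h)
      rw [if_neg hxs, ih hnt x h]; ring

-- weighted sum over distinct keys with multiplicities = plain sum over the list
theorem sum_count_weighted {α : Type} [BEq α] [LawfulBEq α] [DecidableEq α] (g : α → Int) :
    ∀ (ks S : List α), S.Nodup → (∀ x ∈ ks, x ∈ S) →
      (S.map (fun k => g k * (ks.count k : Int))).sum = (ks.map g).sum := by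
  intro ks
  induction ks with
  | nil => intro S _ _; simp
  | cons x t ih =>
    intro S hnd hsub
    have hx : x ∈ S := hsub x (List.mem_cons_self)
    have hsub' : ∀ y ∈ t, y ∈ S := fun y hy => hsub y (List.mem_cons_of_mem _ hy)
    have hsplit : ∀ k : α, ((x :: t).count k : Int)
        = (t.count k : Int) + (if x = k then (1 : Int) else 0) := by
      intro k
      by_cases h : x = k
      · subst h; simp
      · simp [h]
    calc (S.map (fun k => g k * ((x :: t).count k : Int))).sum
        = (S.map (fun k => g k * (t.count k : Int)
            + g k * (if x = k then (1 : Int) else 0))).sum := by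
          apply congrArg
          apply List.map_congr_left
          intro k _
          rw [hsplit k]; ring
      _ = (S.map (fun k => g k * (t.count k : Int))).sum
            + (S.map (fun k => g k * (if x = k then (1 : Int) else 0))).sum := by
          rw [← List.sum_map_add]
      _ = (t.map g).sum + g x := by rw [ih S hnd hsub', sum_map_delta g S hnd x hx]
      _ = ((x :: t).map g).sum := by simp [List.map_cons]; ring

-- A's dict is the Counter of the mapped keys
theorem dictA_eq (numbers : List Int) :
    numbers.foldl (fun d number =>
      d.insert (pyDigitAt number 0, pyDigitAt number (-1))
        (d.getD (pyDigitAt number 0, pyDigitAt number (-1)) 0 + 1)) PySem.Dict.empty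
    = PySem.Dict.counter (numbers.map (fun n => (pyDigitAt n 0, pyDigitAt n (-1)))) := by
  rw [← PySem.Dict.foldl_insert_getD_add_one_eq_counter, List.foldl_map]

theorem dictB_eq (numbers : List Int) (key : Int → Int) :
    numbers.foldl (fun (d : PySem.Dict Int Int) n =>
      d.insert (key n) (d.getD (key n) 0 + 1)) PySem.Dict.empty
    = PySem.Dict.counter (numbers.map key) := by
  rw [← PySem.Dict.foldl_insert_getD_add_one_eq_counter, List.foldl_map]

-- A's inner loop: a foldl accumulating 'if d = p.1.2 then acc + m * p.2' is acc + a sum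
theorem foldl_if_mul_add (d m : Int) :
    ∀ (L : List ((Int × Int) × Int)) (a : Int),
      L.foldl (fun acc p2 => if d = p2.1.2 then acc + m * p2.2 else acc) a
        = a + (L.map (fun p2 => if d = p2.1.2 then m * p2.2 else 0)).sum := by
  intro L
  induction L with
  | nil => intro a; simp
  | cons x t ih =>
    intro a
    by_cases h : d = x.1.2
    · simp only [List.foldl_cons, if_pos h, List.map_cons, List.sum_cons, ih]; ring
    · simp only [List.foldl_cons, if_neg h, List.map_cons, List.sum_cons, ih]; ring

-- A's outer loop: each step adds g x, so the fold is a + the sum of g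
theorem foldl_step_add {β : Type} (f : Int → β → Int) (g : β → Int) :
    ∀ (L : List β) (a : Int), (∀ acc x, x ∈ L → f acc x = acc + g x) →
      L.foldl f a = a + (L.map g).sum := by
  intro L
  induction L with
  | nil => intro a _; simp
  | cons x t ih =>
    intro a h
    simp only [List.foldl_cons, List.map_cons, List.sum_cons]
    rw [h a x List.mem_cons_self, ih (a + g x)
      (fun acc y hy => h acc y (List.mem_cons_of_mem _ hy))]
    ring

theorem solution_eq_double_sum (numbers : List Int) :
    solution numbers
      = ((numbers.map (fun n => (pyDigitAt n 0, pyDigitAt n (-1)))).map (fun x1 =>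
          ((numbers.map (fun n => (pyDigitAt n 0, pyDigitAt n (-1)))).map (fun x2 =>
            if x1.1 = x2.2 then (1 : Int) else 0)).sum)).sum := by
  simp only [solution]
  rw [dictA_eq]
  set ks := numbers.map (fun n => (pyDigitAt n 0, pyDigitAt n (-1))) with hks
  have hitems := PySem.Dict.items_counter (κ := Int × Int) ks
  rw [hitems]
  set S := PySem.Set.ofList ks with hS
  have hndS : S.Nodup := PySem.Set.nodup_ofList ks
  have hsubS : ∀ x ∈ ks, x ∈ S := fun x hx => (PySem.Set.mem_ofList _ _).mpr hx
  -- inner fold → sum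
  have hinner : ∀ (p1 : (Int × Int) × Int) (a : Int),
      (S.map (fun k => (k, (ks.count k : Int)))).foldl (fun pairs p2 =>
        if p1.1.1 = p2.1.2 then pairs + p1.2 * p2.2 else pairs) a
      = a + p1.2 * (ks.map (fun x2 => if p1.1.1 = x2.2 then (1 : Int) else 0)).sum := by
    intro p1 a
    rw [foldl_if_mul_add p1.1.1 p1.2]
    congr 1
    rw [List.map_map]
    have : (S.map (fun k => if p1.1.1 = k.2 then p1.2 * (ks.count k : Int) else 0)).sum
        = (S.map (fun k => (p1.2 * (if p1.1.1 = k.2 then (1:Int) else 0))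
            * (ks.count k : Int))).sum := by
      apply congrArg; apply List.map_congr_left; intro k _
      by_cases h : p1.1.1 = k.2 <;> simp [h]
    rw [show ((fun p2 : (Int × Int) × Int => if p1.1.1 = p2.1.2 then p1.2 * p2.2 else 0)
          ∘ fun k => (k, (ks.count k : Int)))
        = fun k : Int × Int => if p1.1.1 = k.2 then p1.2 * (ks.count k : Int) else 0 from rfl]
    rw [this,
      sum_count_weighted (fun q : Int × Int => p1.2 * (if p1.1.1 = q.2 then (1:Int) else 0))
        ks S hndS hsubS,
      List.map_map, ← List.sum_map_mul_left]
    simp [hks]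
  -- outer fold → sum
  rw [foldl_step_add
      (f := fun pairs p1 =>
        (S.map (fun k => (k, (ks.count k : Int)))).foldl (fun pairs p2 =>
          if p1.1.1 = p2.1.2 then pairs + p1.2 * p2.2 else pairs) pairs)
      (g := fun p1 : (Int × Int) × Int =>
        p1.2 * (ks.map (fun x2 => if p1.1.1 = x2.2 then (1 : Int) else 0)).sum)
      (S.map (fun k => (k, (ks.count k : Int)))) 0
      (fun acc p1 _ => hinner p1 acc)]
  rw [List.map_map]
  rw [show ((fun p1 : (Int × Int) × Int =>
        p1.2 * (ks.map (fun x2 => if p1.1.1 = x2.2 then (1 : Int) else 0)).sum)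
        ∘ fun k => (k, (ks.count k : Int)))
      = fun k : Int × Int =>
          (ks.map (fun x2 => if k.1 = x2.2 then (1 : Int) else 0)).sum
          * (ks.count k : Int) from by funext k; simp [mul_comm]]
  rw [sum_count_weighted (fun q : Int × Int =>
      (ks.map (fun x2 => if q.1 = x2.2 then (1 : Int) else 0)).sum) ks S hndS hsubS]
  simp

theorem solution_alt_eq_sum (numbers : List Int) :
    solution_alt numbers
      = ((numbers.map (fun n => pyDigitAt n 0)).map (fun d =>
          (((numbers.map (fun n => pyDigitAt n (-1))).count d : Int)))).sum := by
  simp only [solution_alt]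
  rw [PySem.List.foldl_prod_mk
      (f := fun (d : PySem.Dict Int Int) n => d.insert (pyDigitAt n 0) (d.getD (pyDigitAt n 0) 0 + 1))
      (g := fun (d : PySem.Dict Int Int) n => d.insert (pyDigitAt n (-1)) (d.getD (pyDigitAt n (-1)) 0 + 1))]
  rw [dictB_eq numbers (fun n => pyDigitAt n 0), dictB_eq numbers (fun n => pyDigitAt n (-1))]
  set fs := numbers.map (fun n => pyDigitAt n 0) with hfs
  set ls := numbers.map (fun n => pyDigitAt n (-1)) with hls
  rw [PySem.Dict.items_counter]
  rw [List.map_map]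
  have : ((fun p : Int × Int => p.2 * (PySem.Dict.counter ls).getD p.1 0)
        ∘ fun k => (k, (fs.count k : Int)))
      = fun d : Int => (ls.count d : Int) * (fs.count d : Int) := by
    funext d
    simp [PySem.Dict.getD_counter, mul_comm]
  rw [this, sum_count_weighted (fun q : Int => (ls.count q : Int)) fs (PySem.Set.ofList fs)
      (PySem.Set.nodup_ofList fs) (fun x hx => (PySem.Set.mem_ofList _ _).mpr hx)]

-- the inner indicator sum is a count of matching last digits
theorem inner_sum_eq_count (numbers : List Int) (d : Int) :
    ((numbers.map (fun n => (pyDigitAt n 0, pyDigitAt n (-1)))).map (fun x2 =>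
        if d = x2.2 then (1 : Int) else 0)).sum
      = ((numbers.map (fun n => pyDigitAt n (-1))).count d : Int) := by
  induction numbers with
  | nil => simp
  | cons x t ih =>
    simp only [List.map_cons, List.sum_cons, ih, List.count_cons]
    by_cases h : d = pyDigitAt x (-1)
    · have : (pyDigitAt x (-1) == d) = true := by simp [h]
      simp [h]
      omega
    · have : (pyDigitAt x (-1) == d) = false := by simp; exact fun he => h he.symm
      simp [h, this]

-- ===== VERDICT (by name: the statement is the Claim_ definition above) =====
theorem solution_spec : Claim_equal_solution := by
  intro numbers _ _
  unfold Spec_solution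
  rw [solution_eq_double_sum, solution_alt_eq_sum]
  rw [List.map_map, List.map_map]
  apply congrArg
  apply List.map_congr_left
  intro n _
  exact inner_sum_eq_count numbers (pyDigitAt n 0)
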